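-- pv_equiv track=rewrite | github.com/Kikyo-16/Sound_event_detection | src/utils.py | format_lst
-- ===== SOURCE A (Python) =====
-- def format_lst(csvs):
-- 	""""
-- 	Format the groundtruths.
-- 	Eg.
-- 	ori list:
-- 		['A.wav   0.00    1.00    Cat',
-- 		 'A.wav   1.00    2.00    Dog',
-- 		 'B.wav   0.00    1.00    Dog']
-- 	obj dict:
-- 		{'A':[['0.00','1.00','Cat'],
-- 		      ['1.00','2.00','Dog']],
-- 		 'B':[['0.00','1.00','Dog']]}
-- 	Args:
-- 		csv: list
-- 			the groundtruth list to format
-- 	Return: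
-- 		result: dict
-- 			formatted results
--
--
-- 	"""
-- 	tests=[t.rstrip().split('\t') for t in csvs]
-- 	result={}
-- 	cur=0
-- 	for i,t in enumerate(tests):
-- 		f=str.replace(t[0],'.wav','')
-- 		if f not in result:
-- 			result[f]=[]
-- 		if len(t)>1:
-- 			result[f]+=[[t[1],t[2],t[3]]]
-- 		else:
-- 			cur+=1
-- 	return result
-- ===== SOURCE B (Python) =====
-- def format_lst(csvs):
-- 	rows = [t.rstrip().split('\t') for t in csvs]
-- 	ks = [t[0].replace('.wav', '') for t in rows]
-- 	keys = list(dict.fromkeys(ks))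
-- 	return {f: [[t[1], t[2], t[3]] for g, t in zip(ks, rows) if g == f and len(t) > 1]
-- 	        for f in keys}
-- ===== Notes on version B (the rewrite author's own statement) =====
-- stated objective: alternative
-- what changed: Replaces A's single-pass incremental dict building with a declarative two-phase grouping: strip all keys once, take the ordered distinct keys via dict.fromkeys, then build each group by one filtering pass over the (key,row) pairs per distinct key in a dict comprehension.
import Mathlib
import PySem

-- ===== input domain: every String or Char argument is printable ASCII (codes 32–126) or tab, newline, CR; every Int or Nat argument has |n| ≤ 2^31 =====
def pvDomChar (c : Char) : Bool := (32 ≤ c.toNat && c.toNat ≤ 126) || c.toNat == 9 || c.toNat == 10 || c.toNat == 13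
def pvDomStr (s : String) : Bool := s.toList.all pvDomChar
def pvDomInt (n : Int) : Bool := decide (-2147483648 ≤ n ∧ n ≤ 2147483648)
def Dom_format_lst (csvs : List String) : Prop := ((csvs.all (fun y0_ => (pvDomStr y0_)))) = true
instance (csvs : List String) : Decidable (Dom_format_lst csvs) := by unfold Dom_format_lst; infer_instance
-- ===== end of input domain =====

-- B replaces A's single-pass incremental dict building by a two-phase grouping (ordered
-- distinct keys via dict.fromkeys, then one filtering pass per key); alternative decomposition,
-- equal return value. No speed claim.

-- ===== PORT A =====
-- shared row parsing: both Pythons compute t.rstrip().split('\t') and t[0].replace('.wav','')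
-- sep "\t" ≠ "" so split? is always `some`; `.getD []` is exact here
def pvRow (s : String) : List String := (PySem.Str.split? (PySem.Str.rstrip s) "\t").getD []
-- split always returns a nonempty list, so t[0] is in range; pyGetD is exact under that
def pvKey (t : List String) : String := PySem.Str.replace (PySem.List.pyGetD t 0 "") ".wav" ""
-- [t[1], t[2], t[3]]; exact under Pre_format_lst (row length 1 or ≥ 4; accessed only when 1 < len)
def pvEntry (t : List String) : List String :=
  [PySem.List.pyGetD t 1 "", PySem.List.pyGetD t 2 "", PySem.List.pyGetD t 3 ""]

-- A's loop body; state = (result, cur) as in the Python (cur is dead for the return value)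
def pvStepA (st : PySem.Dict String (List (List String)) × Int) (t : List String) :
    PySem.Dict String (List (List String)) × Int :=
  let f := pvKey t
  let d := if st.1.contains f then st.1 else st.1.insert f []   -- if f not in result: result[f]=[]
  if 1 < t.length then (d.insert f (d.getD f [] ++ [pvEntry t]), st.2)  -- result[f]+=[[t[1],t[2],t[3]]]
  else (d, st.2 + 1)                                                    -- cur += 1

def format_lst (csvs : List String) : List (String × List (List String)) :=
  let tests := csvs.map pvRow
  (tests.foldl pvStepA (PySem.Dict.empty, 0)).1.items

-- ===== PORT B =====
def format_lst_alt (csvs : List String) : List (String × List (List String)) :=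
  let rows := csvs.map pvRow
  let ks := rows.map pvKey                 -- keys computed once per row
  let keys := PySem.List.dedup ks          -- list(dict.fromkeys(ks))
  keys.map (fun f =>
    (f, ((ks.zip rows).filter (fun p => p.1 == f && decide (1 < p.2.length))).map
      (fun p => pvEntry p.2)))

-- ===== PRECONDITION & SPEC =====
-- Pre_ excludes exactly the inputs on which the Python A raises IndexError: a row whose
-- tab-split (after rstrip) has 2 or 3 fields makes A evaluate t[2] or t[3] out of range.
def Pre_format_lst (csvs : List String) : Prop :=
  ∀ s ∈ csvs, (pvRow s).length ≠ 2 ∧ (pvRow s).length ≠ 3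
instance (csvs : List String) : Decidable (Pre_format_lst csvs) := by
  unfold Pre_format_lst; infer_instance

def pvWitness_format_lst : List String :=
  ["A.wav\t0.00\t1.00\tCat", "A.wav\t1.00\t2.00\tDog", "B.wav"]

def Spec_format_lst (csvs : List String) (out : List (String × List (List String))) : Prop := out = format_lst_alt csvs
instance (csvs : List String) (out : List (String × List (List String))) : Decidable (Spec_format_lst csvs out) := by unfold Spec_format_lst; infer_instance

-- ===== CLAIM (what is proved, stated in full; the proofs are below) =====
def Claim_equal_format_lst : Prop := ∀ (csvs : List String), Dom_format_lst csvs → Pre_format_lst csvs → Spec_format_lst csvs (format_lst csvs)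

-- ===== LEMMAS AND PROOFS =====

-- the dict component of A's loop step (cur dropped)
def pvStepD (d : PySem.Dict String (List (List String))) (t : List String) :
    PySem.Dict String (List (List String)) :=
  let f := pvKey t
  let d := if d.contains f then d else d.insert f []
  if 1 < t.length then d.insert f (d.getD f [] ++ [pvEntry t]) else d

lemma pvStepA_fst (st : PySem.Dict String (List (List String)) × Int) (t : List String) :
    (pvStepA st t).1 = pvStepD st.1 t := by
  unfold pvStepA pvStepD
  split <;> rfl

lemma pvFold_fst (rows : List (List String)) :
    ∀ (d : PySem.Dict String (List (List String))) (c : Int),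
      (rows.foldl pvStepA (d, c)).1 = rows.foldl pvStepD d := by
  induction rows with
  | nil => intro d c; rfl
  | cons t rows ih =>
      intro d c
      simp only [List.foldl]
      have h := pvStepA_fst (d, c) t
      rw [show pvStepA (d, c) t = ((pvStepA (d, c) t).1, (pvStepA (d, c) t).2) from rfl, h,
          ih]

lemma pvStepD_keys (d : PySem.Dict String (List (List String))) (t : List String) :
    (pvStepD d t).keys = PySem.Set.add d.keys (pvKey t) := by
  unfold pvStepD PySem.Set.add
  by_cases hc : d.contains (pvKey t)
  · have hm : (pvKey t) ∈ d.keys := (PySem.Dict.contains_iff_mem_keys d (pvKey t)).1 hc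
    by_cases hl : 1 < t.length <;>
      simp [hc, hl, PySem.Dict.keys_insert_of_contains d _ hc, hm]
  · have hm : ¬ (pvKey t) ∈ d.keys := fun h =>
      hc ((PySem.Dict.contains_iff_mem_keys d (pvKey t)).2 h)
    have hk : (d.insert (pvKey t) []).keys = d.keys ++ [pvKey t] :=
      PySem.Dict.keys_insert_of_not_contains d [] (by simpa using hc)
    by_cases hl : 1 < t.length
    · simp [hc, hl, hm,
        PySem.Dict.keys_insert_of_contains _ _ (PySem.Dict.contains_insert_self d (pvKey t) []),
        hk]
    · simp [hc, hl, hm, hk]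

lemma pvFold_keys (rows : List (List String)) :
    ∀ (d : PySem.Dict String (List (List String))),
      (rows.foldl pvStepD d).keys = PySem.Set.update d.keys (rows.map pvKey) := by
  induction rows with
  | nil => intro d; rfl
  | cons t rows ih =>
      intro d
      simp only [List.foldl, List.map, PySem.Set.update]
      rw [ih, ← pvStepD_keys]
      rfl

lemma pvStepD_getD (d : PySem.Dict String (List (List String))) (t : List String) (f : String) :
    (pvStepD d t).getD f [] =
      d.getD f [] ++ (if pvKey t == f && decide (1 < t.length) then [pvEntry t] else []) := by
  by_cases hl : 1 < t.length <;> by_cases hc : d.contains (pvKey t) = true <;>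
    by_cases hf : pvKey t = f
  · subst hf; simp [pvStepD, hl, hc, PySem.Dict.getD_insert_self]
  · simp [pvStepD, hl, hc, hf, Ne.symm hf, PySem.Dict.getD_insert_of_ne]
  · subst hf
    have hcf : d.contains (pvKey t) = false := by simpa using hc
    simp [pvStepD, hl, hcf, PySem.Dict.getD_insert_self, PySem.Dict.getD_of_not_contains]
  · have hcf : d.contains (pvKey t) = false := by simpa using hc
    simp [pvStepD, hl, hcf, hf, Ne.symm hf, PySem.Dict.getD_insert_of_ne]
  · subst hf; simp [pvStepD, hl, hc]
  · simp [pvStepD, hl, hc]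
  · subst hf
    have hcf : d.contains (pvKey t) = false := by simpa using hc
    simp [pvStepD, hl, hcf, PySem.Dict.getD_insert_self, PySem.Dict.getD_of_not_contains]
  · have hcf : d.contains (pvKey t) = false := by simpa using hc
    simp [pvStepD, hl, hcf, Ne.symm hf, PySem.Dict.getD_insert_of_ne]

lemma pvFold_getD (rows : List (List String)) :
    ∀ (d : PySem.Dict String (List (List String))) (f : String),
      (rows.foldl pvStepD d).getD f [] =
        d.getD f [] ++
          (rows.filter (fun t => pvKey t == f && decide (1 < t.length))).map pvEntry := by
  induction rows with
  | nil => intro d f; simp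
  | cons t rows ih =>
      intro d f
      simp only [List.foldl, List.filter_cons]
      rw [ih, pvStepD_getD]
      by_cases h : (pvKey t == f && decide (1 < t.length)) = true <;>
        simp [h, List.append_assoc]

lemma pvZipFilterMap (rows : List (List String)) (f : String) :
    (((rows.map pvKey).zip rows).filter (fun p => p.1 == f && decide (1 < p.2.length))).map
        (fun p => pvEntry p.2)
      = (rows.filter (fun t => pvKey t == f && decide (1 < t.length))).map pvEntry := by
  induction rows with
  | nil => rfl
  | cons t rows ih =>
      simp only [List.map_cons, List.zip_cons_cons, List.filter_cons]
      by_cases h : (pvKey t == f && decide (1 < t.length)) = true <;> simp [h, ih]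

-- ===== VERDICT (by name: the statement is the Claim_ definition above) =====
theorem format_lst_spec : Claim_equal_format_lst := by
  intro csvs _ _
  unfold Spec_format_lst format_lst format_lst_alt
  simp only []
  rw [pvFold_fst]
  have hkeys : ((csvs.map pvRow).foldl pvStepD PySem.Dict.empty).keys =
      PySem.List.dedup ((csvs.map pvRow).map pvKey) := by
    rw [pvFold_keys, PySem.List.dedup_eq_ofList]
    rfl
  have hnd : ((csvs.map pvRow).foldl pvStepD PySem.Dict.empty).keys.Nodup := by
    rw [hkeys, PySem.List.dedup_eq_ofList]
    exact PySem.Set.nodup_ofList _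
  rw [PySem.Dict.items_eq_map_keys _ hnd [], hkeys]
  apply List.map_congr_left
  intro f _
  rw [pvFold_getD, pvZipFilterMap]
  simp
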